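-- pv_equiv track=rewrite | github.com/s-jinipark/pythonTest | programmers/level-0/00_04.피자 나눠 먹기(2).py | solution
-- ===== SOURCE A (Python) =====
-- def solution(n):
--     answer = 0
--     cnt = 1
--     while True:
--         if ( n * cnt ) % 6 == 0 :
--             answer = int(( n * cnt )/ 6)
--             break
--         else :
--             cnt += 1
--
--     return answer
-- ===== SOURCE B (Python) =====
-- def solution(n):
--     # closed form: the smallest cnt with 6 | n*cnt is 6/gcd(n,6), so the answer is n // gcd(n,6)
--     a, b = abs(n), 6
--     while b:
--         a, b = b, a % b
--     return n // a
-- ===== Notes on version B (the rewrite author's own statement) =====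
-- stated objective: simpler
-- what changed: Replaces the unbounded search for the smallest cnt with 6 | n*cnt by the closed form n // gcd(n,6), computing the gcd with a three-line Euclidean loop.
import Mathlib
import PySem

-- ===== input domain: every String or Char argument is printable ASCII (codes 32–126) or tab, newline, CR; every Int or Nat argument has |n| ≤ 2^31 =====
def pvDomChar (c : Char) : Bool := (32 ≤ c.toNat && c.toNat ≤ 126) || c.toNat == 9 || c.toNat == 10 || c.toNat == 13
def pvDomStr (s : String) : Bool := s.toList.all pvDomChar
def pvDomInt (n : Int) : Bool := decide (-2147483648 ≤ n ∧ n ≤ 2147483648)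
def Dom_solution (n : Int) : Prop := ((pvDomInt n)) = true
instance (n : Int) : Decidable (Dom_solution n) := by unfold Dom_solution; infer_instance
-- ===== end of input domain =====

-- B replaces A's linear search for the smallest cnt with 6 | n*cnt by the closed form
-- n // gcd(n, 6) (Euclidean gcd); objective: simpler.

-- ===== PORT A =====
-- A's 'while True' loop: at each step, if (n*cnt) % 6 == 0 return int((n*cnt)/6), else cnt += 1.
-- The fuel argument (started at 6) is a totality guard only: (n*6) % 6 == 0 always, so the loop
-- always exits with cnt ≤ 6 and the fuel-exhausted value 0 (A's initial 'answer') is unreachable.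
-- int((n*cnt)/6) is ported as truncating division .tdiv; it is applied only when 6 ∣ n*cnt, where
-- the float true division is exact, so Python's int(x/6) equals the exact quotient.
def solutionLoop (n : Int) (cnt : Int) : Nat → Int
  | 0 => 0
  | fuel + 1 =>
    if PySem.Int.mod (n * cnt) 6 = 0 then (n * cnt).tdiv 6
    else solutionLoop n (cnt + 1) fuel

def solution (n : Int) : Int := solutionLoop n 1 6

-- ===== PORT B =====
-- Source B's hand-written Euclidean loop: a, b = abs(n), 6; while b: a, b = b, a % b
def euclidLoop (a b : Nat) : Nat :=
  if h : b = 0 then a else euclidLoop b (a % b)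
termination_by b
decreasing_by exact Nat.mod_lt _ (Nat.pos_of_ne_zero h)

def solution_alt (n : Int) : Int :=
  PySem.Int.floordiv n ((euclidLoop n.natAbs 6 : Nat) : Int)

-- ===== PRECONDITION & SPEC =====
def Spec_solution (n : Int) (out : Int) : Prop := out = solution_alt n
instance (n : Int) (out : Int) : Decidable (Spec_solution n out) := by unfold Spec_solution; infer_instance

-- ===== CLAIM (what is proved, stated in full; the proofs are below) =====
def Claim_equal_solution : Prop := ∀ (n : Int), Dom_solution n → Spec_solution n (solution n)

-- ===== LEMMAS AND PROOFS =====

theorem euclidLoop_eq_gcd (a b : Nat) : euclidLoop a b = Nat.gcd b a := by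
  fun_induction euclidLoop with
  | case1 => simp
  | case2 a b h ih => rw [Nat.gcd_rec b a]; exact ih

theorem euclid_alt (n : Int) : ((euclidLoop n.natAbs 6 : Nat) : Int) = (Int.gcd n 6 : Int) := by
  rw [euclidLoop_eq_gcd, Int.gcd, Nat.gcd_comm]; rfl

theorem mod6_cond (m : Int) : (PySem.Int.mod m 6 = 0) ↔ (6 : Int) ∣ m :=
  PySem.Int.mod_eq_zero_iff_dvd m 6

theorem gcd_of_emod (n r : Int) (h : n % 6 = r) : Int.gcd n 6 = Int.gcd r 6 := by
  rw [← Int.gcd_emod n 6, h]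

theorem solution_spec_aux (n : Int) : solution n = solution_alt n := by
  unfold solution solution_alt
  rw [euclid_alt]
  have hr1 : 0 ≤ n % 6 := Int.emod_nonneg n (by norm_num)
  have hr2 : n % 6 < 6 := Int.emod_lt_of_pos n (by norm_num)
  interval_cases h : (n % 6)
  · obtain ⟨k, rfl⟩ : ∃ k, n = 6 * k + 0 := ⟨n / 6, by omega⟩
    rw [show Int.gcd (6*k+0) 6 = 6 by rw [gcd_of_emod _ 0 h]; rfl]
    simp only [solutionLoop, mod6_cond]
    norm_num
    all_goals split_ifs <;>
      first
        | omega
        | (rw [Int.tdiv_eq_ediv_of_dvd (by omega)]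
           try rw [PySem.Int.floordiv_eq_ediv_of_pos (by norm_num)]
           omega)
  · obtain ⟨k, rfl⟩ : ∃ k, n = 6 * k + 1 := ⟨n / 6, by omega⟩
    rw [show Int.gcd (6*k+1) 6 = 1 by rw [gcd_of_emod _ 1 h]; rfl]
    simp only [solutionLoop, mod6_cond]
    norm_num
    all_goals split_ifs <;>
      first
        | omega
        | (rw [Int.tdiv_eq_ediv_of_dvd (by omega)]
           try rw [PySem.Int.floordiv_eq_ediv_of_pos (by norm_num)]
           omega)
  · obtain ⟨k, rfl⟩ : ∃ k, n = 6 * k + 2 := ⟨n / 6, by omega⟩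
    rw [show Int.gcd (6*k+2) 6 = 2 by rw [gcd_of_emod _ 2 h]; rfl]
    simp only [solutionLoop, mod6_cond]
    norm_num
    all_goals split_ifs <;>
      first
        | omega
        | (rw [Int.tdiv_eq_ediv_of_dvd (by omega)]
           try rw [PySem.Int.floordiv_eq_ediv_of_pos (by norm_num)]
           omega)
  · obtain ⟨k, rfl⟩ : ∃ k, n = 6 * k + 3 := ⟨n / 6, by omega⟩
    rw [show Int.gcd (6*k+3) 6 = 3 by rw [gcd_of_emod _ 3 h]; rfl]
    simp only [solutionLoop, mod6_cond]
    norm_num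
    all_goals split_ifs <;>
      first
        | omega
        | (rw [Int.tdiv_eq_ediv_of_dvd (by omega)]
           try rw [PySem.Int.floordiv_eq_ediv_of_pos (by norm_num)]
           omega)
  · obtain ⟨k, rfl⟩ : ∃ k, n = 6 * k + 4 := ⟨n / 6, by omega⟩
    rw [show Int.gcd (6*k+4) 6 = 2 by rw [gcd_of_emod _ 4 h]; rfl]
    simp only [solutionLoop, mod6_cond]
    norm_num
    all_goals split_ifs <;>
      first
        | omega
        | (rw [Int.tdiv_eq_ediv_of_dvd (by omega)]
           try rw [PySem.Int.floordiv_eq_ediv_of_pos (by norm_num)]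
           omega)
  · obtain ⟨k, rfl⟩ : ∃ k, n = 6 * k + 5 := ⟨n / 6, by omega⟩
    rw [show Int.gcd (6*k+5) 6 = 1 by rw [gcd_of_emod _ 5 h]; rfl]
    simp only [solutionLoop, mod6_cond]
    norm_num
    all_goals split_ifs <;>
      first
        | omega
        | (rw [Int.tdiv_eq_ediv_of_dvd (by omega)]
           try rw [PySem.Int.floordiv_eq_ediv_of_pos (by norm_num)]
           omega)

-- ===== VERDICT (by name: the statement is the Claim_ definition above) =====
theorem solution_spec : Claim_equal_solution := by
  intro n _
  unfold Spec_solution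
  exact solution_spec_aux n
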